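-- pv_equiv track=rewrite | github.com/DenisBorisov-lab/ITtask | bool_hacker.py | conjunction
-- ===== SOURCE A (Python) =====
-- def conjunction(simplified_sdnf):
--     result_array = []
--     for i in range(len(simplified_sdnf)):
--         result = simplified_sdnf[i][0]
--         for j in range(1, len(simplified_sdnf[i])):
--             result = "(" + result + ")" if len(result) > 1 else result
--             another_letter = "(" + simplified_sdnf[i][j] + ")" if len(simplified_sdnf[i][j]) > 1 else \
--                 simplified_sdnf[i][j]
--             result = "(" + result + " | " + another_letter + ")" + " | " + "(" + result + " | " + another_letter + ")"
--             result_array.append(result)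
--     if len(result_array) == 0 and len(simplified_sdnf) != 0:
--         result_array.append(simplified_sdnf[0][0])
--     return result_array
-- ===== SOURCE B (Python) =====
-- def _value(prefix):
--     # value of a whole prefix, computed by recursion on its last element
--     if len(prefix) == 1:
--         return prefix[0]
--     a = _value(prefix[:-1])
--     b = prefix[-1]
--     aw = "(" + a + ")" if len(a) > 1 else a
--     bw = "(" + b + ")" if len(b) > 1 else b
--     p = "(" + aw + " | " + bw + ")"
--     return p + " | " + p
--
--
-- def conjunction(simplified_sdnf):
--     out = [_value(term[:k])
--            for term in simplified_sdnf
--            for k in range(2, len(term) + 1)]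
--     if not out and simplified_sdnf:
--         out.append(simplified_sdnf[0][0])
--     return out
-- ===== Notes on version B (the rewrite author's own statement) =====
-- stated objective: alternative
-- what changed: Instead of one running accumulator interleaving appends inside nested index loops, B recomputes each emitted string independently as the value of a prefix term[:k], via a recursive function peeling the last letter, and collects them in a single comprehension; it trades repeated recomputation of shared prefixes for a stateless, per-prefix definition.
import Mathlib
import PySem

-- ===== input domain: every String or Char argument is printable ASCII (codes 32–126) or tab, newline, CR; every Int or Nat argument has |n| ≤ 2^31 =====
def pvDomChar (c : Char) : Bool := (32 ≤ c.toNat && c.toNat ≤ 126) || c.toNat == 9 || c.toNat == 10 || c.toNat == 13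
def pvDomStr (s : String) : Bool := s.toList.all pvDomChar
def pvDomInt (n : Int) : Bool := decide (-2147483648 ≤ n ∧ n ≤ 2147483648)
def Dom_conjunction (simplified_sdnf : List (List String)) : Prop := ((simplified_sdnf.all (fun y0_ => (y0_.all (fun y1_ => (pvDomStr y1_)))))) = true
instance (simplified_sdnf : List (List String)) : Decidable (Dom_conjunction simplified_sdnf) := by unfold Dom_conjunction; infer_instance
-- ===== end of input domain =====

-- B recomputes each emitted string independently as the value of a prefix term[:k] via recursion on the last letter (alternative stateless decomposition, similar cost); A threads one running accumulator through nested index loops.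


-- ===== PORT A =====
def conjunction (simplified_sdnf : List (List String)) : List String :=
  let result_array : List String :=
    (PySem.List.pyRange 0 (PySem.List.len simplified_sdnf) 1).foldl (fun ra i =>
      let term := PySem.List.pyGetD simplified_sdnf i []
      let result0 := PySem.List.pyGetD term 0 ""
      let p := (PySem.List.pyRange 1 (PySem.List.len term) 1).foldl
        (fun (st : List String × String) j =>
          let result := if PySem.Str.len st.2 > 1 then "(" ++ st.2 ++ ")" else st.2
          let letter := PySem.List.pyGetD term j ""
          let another := if PySem.Str.len letter > 1 then "(" ++ letter ++ ")" else letter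
          let result := "(" ++ result ++ " | " ++ another ++ ")" ++ " | " ++ "(" ++ result ++ " | " ++ another ++ ")"
          (st.1 ++ [result], result)) (ra, result0)
      p.1) []
  if result_array.length == 0 && simplified_sdnf.length != 0 then
    result_array ++ [PySem.List.pyGetD (PySem.List.pyGetD simplified_sdnf 0 []) 0 ""]
  else result_array

-- ===== PORT B =====
-- _value(prefix): recursive, peels the last letter (prefix[:-1] / prefix[-1]);
-- the [] case is unreachable in B (Python would recurse forever there).
def pvValue : List String → String
  | [] => ""
  | [x] => x
  | x :: y :: rest =>
      let pfx := x :: y :: rest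
      let a := pvValue (PySem.List.slice pfx none (some (-1)))
      let b := PySem.List.pyGetD pfx (-1) ""
      let aw := if PySem.Str.len a > 1 then "(" ++ a ++ ")" else a
      let bw := if PySem.Str.len b > 1 then "(" ++ b ++ ")" else b
      let p := "(" ++ aw ++ " | " ++ bw ++ ")"
      p ++ " | " ++ p
termination_by l => l.length
decreasing_by
  simp [PySem.List.slice_to_neg_one]

def conjunction_alt (simplified_sdnf : List (List String)) : List String :=
  let out := simplified_sdnf.flatMap (fun term =>
    (PySem.List.pyRange 2 (PySem.List.len term + 1) 1).map (fun k =>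
      pvValue (PySem.List.slice term none (some k))))
  if out.isEmpty && !simplified_sdnf.isEmpty then
    out ++ [PySem.List.pyGetD (PySem.List.pyGetD simplified_sdnf 0 []) 0 ""]
  else out

-- ===== PRECONDITION & SPEC =====
-- Pre_ excludes inputs containing an empty inner list, on which Python A raises IndexError (term[0]).
def Pre_conjunction (simplified_sdnf : List (List String)) : Prop :=
  ∀ t ∈ simplified_sdnf, t ≠ []
instance (simplified_sdnf : List (List String)) : Decidable (Pre_conjunction simplified_sdnf) := by
  unfold Pre_conjunction; infer_instance

def pvWitness_conjunction : List (List String) := [["x", "ab", "y"], ["z"]]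

def Spec_conjunction (simplified_sdnf : List (List String)) (out : List String) : Prop := out = conjunction_alt simplified_sdnf
instance (simplified_sdnf : List (List String)) (out : List String) : Decidable (Spec_conjunction simplified_sdnf out) := by unfold Spec_conjunction; infer_instance

-- ===== CLAIM (what is proved, stated in full; the proofs are below) =====
def Claim_equal_conjunction : Prop := ∀ (simplified_sdnf : List (List String)), Dom_conjunction simplified_sdnf → Pre_conjunction simplified_sdnf → Spec_conjunction simplified_sdnf (conjunction simplified_sdnf)

-- ===== LEMMAS AND PROOFS =====

-- proof-side combining step (A's doubled string with both operands wrapped)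
def pvCombine (acc letter : String) : String :=
  let a := if PySem.Str.len acc > 1 then "(" ++ acc ++ ")" else acc
  let b := if PySem.Str.len letter > 1 then "(" ++ letter ++ ")" else letter
  let p := "(" ++ a ++ " | " ++ b ++ ")"
  p ++ " | " ++ p

-- proof-side list of A's running states over a term's tail
def pvStates (acc : String) : List String → List String
  | [] => []
  | l :: rest => let nxt := pvCombine acc l; nxt :: pvStates nxt rest

-- final state of A's inner fold, used only to strengthen the induction
def pvLast (r : String) : List String → String
  | [] => r
  | l :: t => pvLast (pvCombine r l) t

-- A's inline doubled string equals pvCombine (re-association of ++)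
theorem pv_combine_eq (r l : String) :
    (let result := if PySem.Str.len r > 1 then "(" ++ r ++ ")" else r
     let another := if PySem.Str.len l > 1 then "(" ++ l ++ ")" else l
     "(" ++ result ++ " | " ++ another ++ ")" ++ " | " ++ "(" ++ result ++ " | " ++ another ++ ")")
    = pvCombine r l := by
  simp only [pvCombine, String.append_assoc]

-- A's inner loop over the tail equals ra ++ the list of running states
theorem pv_inner_eq (tail : List String) : ∀ (r : String) (ra : List String),
    tail.foldl (fun (st : List String × String) letter =>
      let result := if PySem.Str.len st.2 > 1 then "(" ++ st.2 ++ ")" else st.2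
      let another := if PySem.Str.len letter > 1 then "(" ++ letter ++ ")" else letter
      let result := "(" ++ result ++ " | " ++ another ++ ")" ++ " | " ++ "(" ++ result ++ " | " ++ another ++ ")"
      (st.1 ++ [result], result)) (ra, r)
    = (ra ++ pvStates r tail, pvLast r tail) := by
  induction tail with
  | nil => intro r ra; simp [pvStates, pvLast]
  | cons l t ih =>
    intro r ra
    simp only [List.foldl_cons]
    rw [show (let result := if PySem.Str.len r > 1 then "(" ++ r ++ ")" else r
              let another := if PySem.Str.len l > 1 then "(" ++ l ++ ")" else l
              "(" ++ result ++ " | " ++ another ++ ")" ++ " | " ++ "(" ++ result ++ " | " ++ another ++ ")")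
        = pvCombine r l from pv_combine_eq r l]
    rw [ih (pvCombine r l) (ra ++ [pvCombine r l])]
    simp [pvStates, pvLast]

theorem pv_body_eq (ra : List String) (term : List String) :
    ((term.drop 1).foldl (fun (st : List String × String) letter =>
      let result := if PySem.Str.len st.2 > 1 then "(" ++ st.2 ++ ")" else st.2
      let another := if PySem.Str.len letter > 1 then "(" ++ letter ++ ")" else letter
      let result := "(" ++ result ++ " | " ++ another ++ ")" ++ " | " ++ "(" ++ result ++ " | " ++ another ++ ")"
      (st.1 ++ [result], result)) (ra, PySem.List.pyGetD term 0 "")).1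
    = ra ++ (match term with | [] => [] | h :: t => pvStates h t) := by
  cases term with
  | nil => simp
  | cons h t =>
    rw [show PySem.List.pyGetD (h :: t) 0 "" = h from PySem.List.pyGetD_zero_cons h t ""]
    simp only [List.drop_succ_cons, List.drop_zero]
    rw [pv_inner_eq t h ra]

-- B-side: appending one letter to a nonempty prefix is one pvCombine step
theorem pvValue_append (x : String) (xs : List String) (b : String) :
    pvValue ((x :: xs) ++ [b]) = pvCombine (pvValue (x :: xs)) b := by
  cases xs with
  | nil =>
      simp only [List.cons_append, List.nil_append]
      rw [pvValue]
      have hb : PySem.List.pyGetD [x, b] (-1) "" = b := by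
        simpa using PySem.List.pyGetD_neg_one_append_singleton (xs := [x]) (x := b) (d := "")
      simp [PySem.List.slice_to_neg_one, pvValue, pvCombine, hb]
  | cons y ys =>
      have h : (x :: y :: ys) ++ [b] = x :: y :: (ys ++ [b]) := by simp
      rw [h, pvValue]
      simp only [PySem.List.slice_to_neg_one]
      rw [show (x :: y :: (ys ++ [b])).dropLast = x :: y :: ys by
        simpa using List.dropLast_concat (l₁ := x :: y :: ys) (b := b)]
      rw [show PySem.List.pyGetD (x :: y :: (ys ++ [b])) (-1) "" = b by
        simpa using PySem.List.pyGetD_neg_one_append_singleton (xs := x :: y :: ys) (x := b) (d := "")]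
      simp [pvCombine]

-- B's recursive value of a prefix equals A's left fold of pvCombine
theorem pvValue_eq_foldl (s : List String) : ∀ (h : String),
    pvValue (h :: s) = s.foldl pvCombine h := by
  induction s using List.reverseRecOn with
  | nil => intro h; simp [pvValue]
  | append_singleton s b ih =>
      intro h
      rw [show h :: (s ++ [b]) = (h :: s) ++ [b] by simp]
      rw [pvValue_append h s b, ih h]
      simp

-- A's running states are the fold values of the successive prefixes
theorem pvStates_eq_map (t : List String) : ∀ (h : String),
    (List.range t.length).map (fun j => (t.take (j + 1)).foldl pvCombine h) = pvStates h t := by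
  induction t with
  | nil => intro h; simp [pvStates]
  | cons l rest ih =>
      intro h
      rw [List.length_cons, List.range_succ_eq_map, List.map_cons, List.map_map]
      rw [pvStates]
      refine congrArg₂ _ (by simp) ?_
      rw [← ih (pvCombine h l)]
      apply List.map_congr_left
      intro j _
      simp [List.take_succ_cons]

-- B's per-term comprehension equals A's running states
theorem pv_term_eq (term : List String) :
    (PySem.List.pyRange 2 (PySem.List.len term + 1) 1).map (fun k =>
      pvValue (PySem.List.slice term none (some k)))
    = (match term with | [] => [] | h :: t => pvStates h t) := by
  cases term with
  | nil =>
      rw [PySem.List.pyRange_one_eq_nil (by simp [PySem.List.len])]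
      simp
  | cons h t =>
      show _ = pvStates h t
      rw [PySem.List.pyRange_one]
      rw [List.map_map]
      have hlen : ((PySem.List.len (h :: t) + 1 - 2)).toNat = t.length := by
        simp [PySem.List.len]; omega
      rw [hlen, ← pvStates_eq_map t h]
      apply List.map_congr_left
      intro j _
      have h2 : (2 : Int) + (j : Int) = ((j + 2 : Nat) : Int) := by push_cast; ring
      simp only [Function.comp_apply, h2, PySem.List.slice_to_natCast]
      rw [show (h :: t).take (j + 2) = h :: t.take (j + 1) from rfl]
      rw [pvValue_eq_foldl]

-- ===== VERDICT (by name: the statement is the Claim_ definition above) =====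
theorem conjunction_spec : Claim_equal_conjunction := by
  intro sdnf _ _
  unfold Spec_conjunction conjunction conjunction_alt
  have houter :
      (PySem.List.pyRange 0 (PySem.List.len sdnf) 1).foldl (fun ra i =>
        let term := PySem.List.pyGetD sdnf i []
        let result0 := PySem.List.pyGetD term 0 ""
        let p := (PySem.List.pyRange 1 (PySem.List.len term) 1).foldl
          (fun (st : List String × String) j =>
            let result := if PySem.Str.len st.2 > 1 then "(" ++ st.2 ++ ")" else st.2
            let letter := PySem.List.pyGetD term j ""
            let another := if PySem.Str.len letter > 1 then "(" ++ letter ++ ")" else letter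
            let result := "(" ++ result ++ " | " ++ another ++ ")" ++ " | " ++ "(" ++ result ++ " | " ++ another ++ ")"
            (st.1 ++ [result], result)) (ra, result0)
        p.1) ([] : List String)
      = sdnf.flatMap (fun term => match term with | [] => [] | h :: t => pvStates h t) := by
    rw [PySem.List.foldl_pyRange_pyGetD sdnf ([] : List String)
        (fun ra term =>
          ((PySem.List.pyRange 1 (PySem.List.len term) 1).foldl
            (fun (st : List String × String) j =>
              let result := if PySem.Str.len st.2 > 1 then "(" ++ st.2 ++ ")" else st.2
              let letter := PySem.List.pyGetD term j ""
              let another := if PySem.Str.len letter > 1 then "(" ++ letter ++ ")" else letter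
              let result := "(" ++ result ++ " | " ++ another ++ ")" ++ " | " ++ "(" ++ result ++ " | " ++ another ++ ")"
              (st.1 ++ [result], result)) (ra, PySem.List.pyGetD term 0 "")).1)
        ([] : List String) (le_refl 0)]
    simp only [Int.toNat_zero, List.drop_zero]
    have hstep : ∀ (ra : List String) (term : List String),
        ((PySem.List.pyRange 1 (PySem.List.len term) 1).foldl
          (fun (st : List String × String) j =>
            let result := if PySem.Str.len st.2 > 1 then "(" ++ st.2 ++ ")" else st.2
            let letter := PySem.List.pyGetD term j ""
            let another := if PySem.Str.len letter > 1 then "(" ++ letter ++ ")" else letter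
            let result := "(" ++ result ++ " | " ++ another ++ ")" ++ " | " ++ "(" ++ result ++ " | " ++ another ++ ")"
            (st.1 ++ [result], result)) (ra, PySem.List.pyGetD term 0 "")).1
        = ra ++ (match term with | [] => [] | h :: t => pvStates h t) := by
      intro ra term
      rw [PySem.List.foldl_pyRange_pyGetD term ""
          (fun (st : List String × String) letter =>
            let result := if PySem.Str.len st.2 > 1 then "(" ++ st.2 ++ ")" else st.2
            let another := if PySem.Str.len letter > 1 then "(" ++ letter ++ ")" else letter
            let result := "(" ++ result ++ " | " ++ another ++ ")" ++ " | " ++ "(" ++ result ++ " | " ++ another ++ ")"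
            (st.1 ++ [result], result))
          (ra, PySem.List.pyGetD term 0 "") (by norm_num)]
      exact pv_body_eq ra term
    calc _ = sdnf.foldl (fun ra term => ra ++ (match term with | [] => [] | h :: t => pvStates h t)) [] := by
              exact List.foldl_ext _ _ _ (fun ra term _ => hstep ra term)
      _ = _ := by
              rw [PySem.List.foldl_append_eq_flatMap]; simp
  have hB : sdnf.flatMap (fun term =>
      (PySem.List.pyRange 2 (PySem.List.len term + 1) 1).map (fun k =>
        pvValue (PySem.List.slice term none (some k))))
      = sdnf.flatMap (fun term => match term with | [] => [] | h :: t => pvStates h t) := by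
    exact List.flatMap_congr (fun term _ => pv_term_eq term)
  rw [houter, hB]
  generalize (List.flatMap (fun term => match term with | [] => [] | h :: t => pvStates h t) sdnf) = flat
  have hc : (flat.length == 0 && sdnf.length != 0) = (flat.isEmpty && !sdnf.isEmpty) := by
    cases flat <;> cases sdnf <;> simp
  dsimp only
  rw [hc]
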